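-- pv_equiv track=rewrite | github.com/Ayushhgit/DisAgent | MainAgent/orchestrator/extractors.py | _strip_outer_only
-- ===== SOURCE A (Python) =====
-- def _strip_outer_only(text: str) -> str:
--     """Strip only the outer whitespace while preserving internal indentation.
--
--     This removes leading/trailing blank lines but keeps indentation on content lines.
--     IMPORTANT: Preserves internal structure exactly as-is.
--     """
--     if not text:
--         return ""
--
--     lines = text.split('\n')
--
--     # Find first non-empty line
--     start = 0
--     while start < len(lines) and not lines[start].strip():
--         start += 1
--
--     # Find last non-empty line
--     end = len(lines) - 1
--     while end >= 0 and not lines[end].strip():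
--         end -= 1
--
--     if start > end:
--         return ""
--
--     # Return lines with preserved indentation, but strip trailing whitespace from each line
--     result_lines = [line.rstrip() for line in lines[start:end + 1]]
--     return '\n'.join(result_lines)
-- ===== SOURCE B (Python) =====
-- def _strip_outer_only(text: str) -> str:
--     if not text:
--         return ""
--     result = '\n'.join(line.rstrip() for line in text.split('\n'))
--     return result.strip('\n')
-- ===== Notes on version B (the rewrite author's own statement) =====
-- stated objective: simpler
-- what changed: Replaces the two index-scanning while loops and the slice with a single rstrip-each-line pass followed by stripping '\n' off the joined result (rstripped blank lines become empty, so outer blanks collapse into leading/trailing newlines).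
import Mathlib
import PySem

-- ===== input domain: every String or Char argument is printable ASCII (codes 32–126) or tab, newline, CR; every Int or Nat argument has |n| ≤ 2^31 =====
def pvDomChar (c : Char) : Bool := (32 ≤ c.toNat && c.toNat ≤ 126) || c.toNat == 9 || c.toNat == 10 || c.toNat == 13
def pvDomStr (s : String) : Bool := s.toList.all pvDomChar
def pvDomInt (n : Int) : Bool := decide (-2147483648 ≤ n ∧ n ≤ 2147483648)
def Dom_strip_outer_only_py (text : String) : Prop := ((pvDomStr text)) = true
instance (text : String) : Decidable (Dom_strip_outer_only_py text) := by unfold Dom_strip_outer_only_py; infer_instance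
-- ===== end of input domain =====

-- B replaces A's two index-scanning while loops and the slice by rstripping every line and
-- stripping '\n' off the joined result (objective: simpler decomposition, same cost).


-- ===== PORT A =====
-- 'not lines[i].strip()' as a Bool test
def pvBlank (l : String) : Bool := PySem.Str.strip l == ""

-- 'while start < len(lines) and not lines[start].strip(): start += 1'
def pvFindStart (lines : List String) (start : Nat) : Nat :=
  if h : start < lines.length ∧ pvBlank (lines.getD start "") then
    pvFindStart lines (start + 1)
  else start
termination_by lines.length - start
decreasing_by omega

-- 'while end >= 0 and not lines[end].strip(): end -= 1'
def pvFindEnd (lines : List String) (e : Int) : Int :=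
  if h : 0 ≤ e ∧ pvBlank (lines.getD e.toNat "") then
    pvFindEnd lines (e - 1)
  else e
termination_by (e + 1).toNat
decreasing_by omega

def strip_outer_only_py (text : String) : String :=
  if text == "" then ""
  else
    let lines := (PySem.Str.split? text "\n").getD []
    let start := pvFindStart lines 0
    let e := pvFindEnd lines ((lines.length : Int) - 1)
    if (start : Int) > e then ""
    else
      let result_lines := (PySem.List.slice lines (some (start : Int)) (some (e + 1))).map PySem.Str.rstrip
      PySem.Str.join "\n" result_lines

-- ===== PORT B =====
def strip_outer_only_py_alt (text : String) : String :=
  if text == "" then ""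
  else
    let result := PySem.Str.join "\n" (((PySem.Str.split? text "\n").getD []).map PySem.Str.rstrip)
    PySem.Str.stripChars result "\n"

-- ===== PRECONDITION & SPEC =====
def Spec_strip_outer_only_py (text : String) (out : String) : Prop := out = strip_outer_only_py_alt text
instance (text : String) (out : String) : Decidable (Spec_strip_outer_only_py text out) := by unfold Spec_strip_outer_only_py; infer_instance

-- ===== CLAIM (what is proved, stated in full; the proofs are below) =====
def Claim_equal_strip_outer_only_py : Prop := ∀ (text : String), Dom_strip_outer_only_py text → Spec_strip_outer_only_py text (strip_outer_only_py text)

-- ===== LEMMAS AND PROOFS =====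

-- generic list facts ------------------------------------------------------

theorem pv_dropWhile_eq_drop {α} (p : α → Bool) (l : List α) :
    l.dropWhile p = l.drop (l.takeWhile p).length := by
  induction l with
  | nil => simp
  | cons x xs ih =>
    by_cases h : p x <;> simp [List.dropWhile_cons, List.takeWhile_cons, h, ih]

theorem pv_takeWhile_append_left {α} (p : α → Bool) (u v : List α)
    (h : ∃ x ∈ u, p x = false) :
    (u ++ v).takeWhile p = u.takeWhile p := by
  induction u with
  | nil => simp at h
  | cons x xs ih =>
    by_cases hx : p x
    · obtain ⟨y, hy, hpy⟩ := h
      rcases List.mem_cons.mp hy with rfl | hy'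
      · simp [hx] at hpy
      · simp [List.takeWhile_cons, hx, ih ⟨y, hy', hpy⟩]
    · simp [List.takeWhile_cons, hx]

theorem pv_takeWhile_lt_length {α} (p : α → Bool) (l : List α)
    (h : ∃ x ∈ l, p x = false) : (l.takeWhile p).length < l.length := by
  induction l with
  | nil => simp at h
  | cons x xs ih =>
    by_cases hx : p x
    · obtain ⟨y, hy, hpy⟩ := h
      rcases List.mem_cons.mp hy with rfl | hy'
      · simp [hx] at hpy
      · simp only [List.takeWhile_cons, hx, if_true, List.length_cons]
        exact Nat.succ_lt_succ (ih ⟨y, hy', hpy⟩)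
    · simp [List.takeWhile_cons, hx]

theorem pv_rev_takeWhile {α} (p : α → Bool) (ns : List α)
    (hne : ns.dropWhile p ≠ []) :
    ns.reverse.takeWhile p = (ns.dropWhile p).reverse.takeWhile p := by
  have hhead : p ((ns.dropWhile p).head hne) = false := List.head_dropWhile_not p hne
  have hmem : ∃ x ∈ (ns.dropWhile p).reverse, p x = false :=
    ⟨(ns.dropWhile p).head hne, by simp [List.head_mem], hhead⟩
  conv_lhs => rw [← List.takeWhile_append_dropWhile (p := p) (l := ns)]
  rw [List.reverse_append]
  exact pv_takeWhile_append_left _ _ _ hmem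

-- both ends trimmed, expressed as drop/take --------------------------------

theorem pv_core {α} (p : α → Bool) (ns : List α) :
    ((ns.dropWhile p).reverse.dropWhile p).reverse
      = (ns.drop (ns.takeWhile p).length).take
          (ns.length - (ns.reverse.takeWhile p).length - (ns.takeWhile p).length) := by
  rw [← pv_dropWhile_eq_drop]
  rcases eq_or_ne (ns.dropWhile p) [] with hnil | hne
  · simp [hnil]
  · rw [pv_rev_takeWhile p ns hne]
    rw [pv_dropWhile_eq_drop p (ns.dropWhile p).reverse]
    rw [List.reverse_drop, List.reverse_reverse, List.length_reverse]
    congr 1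
    have h1 : (ns.dropWhile p).length = ns.length - (ns.takeWhile p).length := by
      rw [pv_dropWhile_eq_drop]; simp
    have h2 : (ns.takeWhile p).length ≤ ns.length := (List.takeWhile_sublist p).length_le
    have h3 : ((ns.dropWhile p).reverse.takeWhile p).length ≤ (ns.dropWhile p).length := by
      simpa using (List.takeWhile_sublist (l := (ns.dropWhile p).reverse) p).length_le
    omega

theorem pv_core2 {α} (p : α → Bool) (ns : List α) (h : ∃ x ∈ ns, p x = false) :
    (ns.takeWhile p).length + (ns.reverse.takeWhile p).length < ns.length := by
  have hne : ns.dropWhile p ≠ [] := by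
    intro hc
    obtain ⟨x, hx, hpx⟩ := h
    rw [List.dropWhile_eq_nil_iff] at hc
    simp [hc x hx] at hpx
  have hhead : p ((ns.dropWhile p).head hne) = false := List.head_dropWhile_not p hne
  have hmem : ∃ x ∈ (ns.dropWhile p).reverse, p x = false :=
    ⟨(ns.dropWhile p).head hne, by simp [List.head_mem], hhead⟩
  have hb := pv_rev_takeWhile p ns hne
  have h1 : (ns.dropWhile p).length = ns.length - (ns.takeWhile p).length := by
    rw [pv_dropWhile_eq_drop]; simp
  have h2 : (ns.takeWhile p).length ≤ ns.length := (List.takeWhile_sublist p).length_le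
  have h3 := pv_takeWhile_lt_length p (ns.dropWhile p).reverse hmem
  rw [hb]
  simp only [List.length_reverse] at h3
  omega

-- pvFindStart / pvFindEnd characterizations --------------------------------

theorem pv_findStart_eq (lines : List String) (s : Nat) :
    pvFindStart lines s = s + ((lines.drop s).takeWhile pvBlank).length := by
  fun_induction pvFindStart lines s with
  | case1 s h ih =>
    obtain ⟨h1, h2⟩ := h
    rw [List.getD_eq_getElem?_getD, List.getElem?_eq_getElem h1] at h2
    simp only [Option.getD_some] at h2
    rw [List.drop_eq_getElem_cons h1, List.takeWhile_cons, if_pos h2]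
    simp only [List.length_cons]
    omega
  | case2 s h =>
    by_cases h1 : s < lines.length
    · have h2 : pvBlank (lines.getD s "") = false := by
        by_contra hc
        exact h ⟨h1, by simpa using hc⟩
      rw [List.getD_eq_getElem?_getD, List.getElem?_eq_getElem h1] at h2
      simp only [Option.getD_some] at h2
      rw [List.drop_eq_getElem_cons h1, List.takeWhile_cons, if_neg (by simp [h2])]
      simp
    · rw [List.drop_eq_nil_of_le (by omega)]
      simp

theorem pv_findEnd_eq (lines : List String) (k : Nat) (hk : k ≤ lines.length) :
    pvFindEnd lines ((k : Int) - 1)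
      = (k : Int) - 1 - (((lines.take k).reverse.takeWhile pvBlank).length : Int) := by
  induction k with
  | zero =>
    rw [pvFindEnd]
    rw [dif_neg (by simp)]
    simp
  | succ k ih =>
    have hklt : k < lines.length := hk
    have htl : ((k + 1 : Nat) : Int) - 1 = (k : Int) := by push_cast; ring
    have hgd : lines.getD (((k + 1 : Nat) : Int) - 1).toNat "" = lines[k] := by
      rw [htl, Int.toNat_natCast, List.getD_eq_getElem?_getD, List.getElem?_eq_getElem hklt,
        Option.getD_some]
    have htake : (lines.take (k + 1)).reverse = lines[k] :: (lines.take k).reverse := by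
      rw [List.take_succ_eq_append_getElem hklt, List.reverse_append]
      simp
    rw [pvFindEnd]
    by_cases hb : pvBlank lines[k]
    · rw [dif_pos ⟨by omega, by rw [hgd]; exact hb⟩]
      rw [htl, ih (by omega)]
      rw [htake, List.takeWhile_cons, if_pos hb]
      simp only [List.length_cons]
      push_cast
      ring
    · rw [dif_neg (by rw [hgd]; intro hc; exact hb hc.2)]
      rw [htake, List.takeWhile_cons, if_neg (by simp [hb])]
      simp

-- blankness ----------------------------------------------------------------

theorem pv_rstrip_eq_nil_iff (cs : List Char) :
    PySem.Chars.rstrip cs = [] ↔ ∀ c ∈ cs, PySem.Chars.isspace c := by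
  simp [PySem.Chars.rstrip, List.dropWhile_eq_nil_iff]

theorem pv_strip_eq_nil_iff (cs : List Char) :
    PySem.Chars.strip cs = [] ↔ ∀ c ∈ cs, PySem.Chars.isspace c := by
  show PySem.Chars.rstrip (PySem.Chars.lstrip cs) = [] ↔ _
  rw [pv_rstrip_eq_nil_iff]
  constructor
  · intro h c hc
    conv at hc => rw [← List.takeWhile_append_dropWhile (p := PySem.Chars.isspace) (l := cs)]
    rcases List.mem_append.mp hc with h1 | h2
    · exact List.mem_takeWhile_imp h1
    · exact h c h2
  · intro h c hc
    exact h c ((List.dropWhile_sublist _).mem hc)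

theorem pv_blank_eq (l : String) :
    pvBlank l = (PySem.Chars.rstrip l.toList).isEmpty := by
  rw [Bool.eq_iff_iff, List.isEmpty_iff, pv_rstrip_eq_nil_iff]
  unfold pvBlank
  rw [beq_iff_eq, ← String.toList_inj, PySem.Str.toList_strip]
  rw [show ("" : String).toList = [] from rfl]
  exact pv_strip_eq_nil_iff l.toList

-- join / stripChars --------------------------------------------------------

theorem pv_join_append_singleton (ys : List (List Char)) (z : List Char) (h : ys ≠ []) :
    PySem.Chars.join ['\n'] (ys ++ [z]) = PySem.Chars.join ['\n'] ys ++ '\n' :: z := by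
  induction ys with
  | nil => cases h rfl
  | cons y ys ih =>
    cases ys with
    | nil => simp [PySem.Chars.join_cons_cons, PySem.Chars.join_singleton]
    | cons y2 ys2 =>
      rw [List.cons_append, List.cons_append, PySem.Chars.join_cons_cons,
        ← List.cons_append, ih (by simp), PySem.Chars.join_cons_cons]
      simp

theorem pv_join_reverse (ns : List (List Char)) :
    (PySem.Chars.join ['\n'] ns).reverse
      = PySem.Chars.join ['\n'] ((ns.map List.reverse).reverse) := by
  induction ns with
  | nil => simp [PySem.Chars.join_nil]
  | cons l rest ih =>
    cases rest with
    | nil => simp [PySem.Chars.join_singleton]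
    | cons r rs =>
      rw [PySem.Chars.join_cons_cons, List.map_cons, List.reverse_cons,
        pv_join_append_singleton _ _ (by simp), ← ih]
      simp

theorem pv_lead (ns : List (List Char)) (h : ∀ l ∈ ns, '\n' ∉ l) :
    (PySem.Chars.join ['\n'] ns).dropWhile (fun c => ['\n'].contains c)
      = PySem.Chars.join ['\n'] (ns.dropWhile List.isEmpty) := by
  induction ns with
  | nil => simp [PySem.Chars.join_nil]
  | cons l rest ih =>
    by_cases hl : l = []
    · subst hl
      cases rest with
      | nil => simp [PySem.Chars.join_singleton, PySem.Chars.join_nil]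
      | cons r rs =>
        have hrhs : List.dropWhile List.isEmpty ([] :: r :: rs) = List.dropWhile List.isEmpty (r :: rs) :=
          List.dropWhile_cons_of_pos (by simp)
        have hlhs : List.dropWhile (fun c => (['\n'] : List Char).contains c)
              (PySem.Chars.join ['\n'] ([] :: r :: rs))
            = List.dropWhile (fun c => (['\n'] : List Char).contains c)
                (PySem.Chars.join ['\n'] (r :: rs)) := by
          rw [PySem.Chars.join_cons_cons]
          exact List.dropWhile_cons_of_pos (by simp)
        rw [hlhs, hrhs]
        exact ih (fun x hx => h x (List.mem_cons_of_mem _ hx))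
    · obtain ⟨c, cs, rfl⟩ := List.exists_cons_of_ne_nil hl
      have hc : c ≠ '\n' := by
        intro e
        exact h _ (List.mem_cons_self) (by simp [e])
      have hstep : ∀ (tail : List Char),
          ((c :: cs) ++ tail).dropWhile (fun c => ['\n'].contains c) = (c :: cs) ++ tail := by
        intro tail
        rw [List.cons_append, List.dropWhile_cons_of_neg (by simpa using hc)]
      have hdw : (((c :: cs) :: rest).dropWhile List.isEmpty) = (c :: cs) :: rest := by
        rw [List.dropWhile_cons, if_neg (by simp)]
      rw [hdw]
      cases rest with
      | nil =>
        rw [PySem.Chars.join_singleton]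
        rw [List.dropWhile_cons_of_neg (by simpa using hc)]
      | cons r rs =>
        rw [PySem.Chars.join_cons_cons, List.append_assoc, hstep]

theorem pv_stripChars_join (ns : List (List Char)) (h : ∀ l ∈ ns, '\n' ∉ l) :
    PySem.Chars.stripChars (PySem.Chars.join ['\n'] ns) ['\n']
      = PySem.Chars.join ['\n']
          (((ns.dropWhile List.isEmpty).reverse.dropWhile List.isEmpty).reverse) := by
  show ((((PySem.Chars.join ['\n'] ns).dropWhile (fun c => (['\n'] : List Char).contains c)).reverse.dropWhile
      (fun c => (['\n'] : List Char).contains c)).reverse) = _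
  rw [pv_lead ns h]
  have h1 : ∀ l ∈ ns.dropWhile List.isEmpty, '\n' ∉ l :=
    fun l hl => h l ((List.dropWhile_sublist _).mem hl)
  rw [pv_join_reverse]
  have h2 : ∀ l ∈ (((ns.dropWhile List.isEmpty).map List.reverse).reverse), '\n' ∉ l := by
    intro l hl
    rw [List.mem_reverse, List.mem_map] at hl
    obtain ⟨m, hm, rfl⟩ := hl
    rw [List.mem_reverse]
    exact h1 m hm
  rw [pv_lead _ h2]
  rw [← List.map_reverse, List.dropWhile_map]
  have h3 : (List.isEmpty ∘ List.reverse : List Char → Bool) = List.isEmpty := by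
    funext x; simp [Function.comp]
  rw [h3]
  rw [pv_join_reverse, List.map_map]
  have h4 : (List.reverse ∘ List.reverse : List Char → List Char) = id := by
    funext x; simp [Function.comp]
  rw [h4, List.map_id]

-- splitOn produces pieces without the separator char ------------------------

theorem pv_go_clean (fuel : Nat) (l cur : List Char) (acc : List (List Char))
    (hl : l.length ≤ fuel) (hcur : '\n' ∉ cur) (hacc : ∀ p ∈ acc, '\n' ∉ p) :
    ∀ q ∈ PySem.Chars.splitOn.go ['\n'] fuel l cur acc, '\n' ∉ q := by
  induction fuel generalizing l cur acc with
  | zero =>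
    have hnil : l = [] := List.length_eq_zero_iff.mp (Nat.le_zero.mp hl)
    subst hnil
    intro q hq
    rw [PySem.Chars.splitOn.go.eq_def] at hq
    simp only [List.mem_reverse, List.mem_cons] at hq
    rcases hq with rfl | hq
    · simpa using hcur
    · exact hacc q hq
  | succ n ih =>
    cases l with
    | nil =>
      intro q hq
      rw [PySem.Chars.splitOn.go.eq_def] at hq
      simp only [List.mem_reverse, List.mem_cons] at hq
      rcases hq with rfl | hq
      · simpa using hcur
      · exact hacc q hq
    | cons c rest =>
      rw [PySem.Chars.splitOn.go.eq_def]
      simp only []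
      by_cases hpre : (['\n'] : List Char).isPrefixOf (c :: rest) = true
      · rw [if_pos hpre]
        have : (List.drop (['\n'] : List Char).length (c :: rest)) = rest := by simp
        rw [this]
        refine ih rest [] ((cur.reverse) :: acc) (by simpa using hl) (by simp) ?_
        intro p hp
        rcases List.mem_cons.mp hp with rfl | hp'
        · simpa using hcur
        · exact hacc p hp'
      · rw [if_neg hpre]
        have hc : c ≠ '\n' := by
          intro e
          apply hpre
          simp [e, List.isPrefixOf]
        refine ih rest (c :: cur) acc (by simpa using hl) ?_ hacc
        intro hmem
        rcases List.mem_cons.mp hmem with e | hmem'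
        · exact hc e.symm
        · exact hcur hmem'

theorem pv_splitOn_clean (s : List Char) :
    ∀ q ∈ PySem.Chars.splitOn s ['\n'], '\n' ∉ q := by
  exact pv_go_clean (s.length + 1) s [] [] (by omega) (by simp) (by simp)

-- main ---------------------------------------------------------------------

theorem pv_main (lines : List String) (h : ∀ l ∈ lines, '\n' ∉ l.toList) :
    (if (pvFindStart lines 0 : Int) > pvFindEnd lines ((lines.length : Int) - 1) then ""
     else PySem.Str.join "\n"
       ((PySem.List.slice lines (some ((pvFindStart lines 0 : Nat) : Int))
          (some (pvFindEnd lines ((lines.length : Int) - 1) + 1))).map PySem.Str.rstrip))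
    = PySem.Str.stripChars (PySem.Str.join "\n" (lines.map PySem.Str.rstrip)) "\n" := by
  have hpb : pvBlank = fun l : String => (PySem.Chars.rstrip l.toList).isEmpty :=
    funext fun l => pv_blank_eq l
  have hstart : pvFindStart lines 0 = (lines.takeWhile pvBlank).length := by
    simpa using pv_findStart_eq lines 0
  have hend : pvFindEnd lines ((lines.length : Int) - 1)
      = (lines.length : Int) - 1 - ((lines.reverse.takeWhile pvBlank).length : Int) := by
    simpa using pv_findEnd_eq lines lines.length le_rfl
  -- the rstripped lines, as char lists
  have hclean : ∀ q ∈ lines.map (fun l => PySem.Chars.rstrip l.toList), '\n' ∉ q := by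
    intro q hq
    obtain ⟨l, hl, rfl⟩ := List.mem_map.mp hq
    intro hc
    refine h l hl ?_
    have : '\n' ∈ (List.dropWhile PySem.Chars.isspace l.toList.reverse) := by
      simpa [PySem.Chars.rstrip] using hc
    exact List.mem_reverse.mp ((List.dropWhile_sublist _).mem this)
  have hA : (lines.takeWhile pvBlank).length
      = ((lines.map (fun l => PySem.Chars.rstrip l.toList)).takeWhile List.isEmpty).length := by
    rw [List.takeWhile_map, List.length_map]
    congr 1
    rw [hpb]
    rfl
  have hB : (lines.reverse.takeWhile pvBlank).length
      = ((lines.map (fun l => PySem.Chars.rstrip l.toList)).reverse.takeWhile List.isEmpty).length := by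
    rw [← List.map_reverse, List.takeWhile_map, List.length_map]
    congr 1
    rw [hpb]
    rfl
  rw [← String.toList_inj]
  rw [PySem.Str.toList_stripChars, PySem.Str.toList_join]
  rw [show ("\n" : String).toList = ['\n'] from rfl]
  have hmaps : List.map String.toList (List.map PySem.Str.rstrip lines)
      = lines.map (fun l => PySem.Chars.rstrip l.toList) := by
    rw [List.map_map]
    exact List.map_congr_left fun l _ => PySem.Str.toList_rstrip l
  rw [hmaps, pv_stripChars_join _ hclean]
  by_cases hall : ∀ l ∈ lines.map (fun l => PySem.Chars.rstrip l.toList), l.isEmpty = true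
  · -- every line is blank: A takes the early-"" branch, B's trim empties everything
    have hdw : (lines.map (fun l => PySem.Chars.rstrip l.toList)).dropWhile List.isEmpty = [] :=
      List.dropWhile_eq_nil_iff.mpr hall
    have ha : (lines.takeWhile pvBlank).length = lines.length := by
      rw [hA]
      have : ((lines.map (fun l => PySem.Chars.rstrip l.toList)).takeWhile List.isEmpty)
          = lines.map (fun l => PySem.Chars.rstrip l.toList) :=
        List.takeWhile_eq_self_iff.mpr hall
      rw [this, List.length_map]
    have hb : (lines.reverse.takeWhile pvBlank).length = lines.length := by
      rw [hB]
      have : (((lines.map (fun l => PySem.Chars.rstrip l.toList)).reverse).takeWhile List.isEmpty)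
          = (lines.map (fun l => PySem.Chars.rstrip l.toList)).reverse :=
        List.takeWhile_eq_self_iff.mpr (by intro x hx; exact hall x (List.mem_reverse.mp hx))
      rw [this, List.length_reverse, List.length_map]
    rw [if_pos (by rw [hstart, hend, ha, hb]; push_cast; omega)]
    rw [hdw]
    simp [PySem.Chars.join_nil]
  · -- some line has content
    have hex : ∃ x ∈ lines.map (fun l => PySem.Chars.rstrip l.toList), x.isEmpty = false := by
      push_neg at hall
      obtain ⟨x, hx, hxe⟩ := hall
      exact ⟨x, hx, by simpa using hxe⟩
    have hlt := pv_core2 List.isEmpty _ hex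
    rw [List.length_map] at hlt
    have hble : (lines.reverse.takeWhile pvBlank).length ≤ lines.length := by
      rw [hB]; omega
    rw [if_neg (by rw [hstart, hend, hA, hB]; push_cast; omega)]
    rw [hstart, hend]
    have hsl : ((lines.length : Int) - 1 - ((lines.reverse.takeWhile pvBlank).length : Int) + 1)
        = ((lines.length - (lines.reverse.takeWhile pvBlank).length : Nat) : Int) := by
      push_cast [hble]
      ring
    rw [hsl, PySem.List.slice_natCast]
    rw [PySem.Str.toList_join, show ("\n" : String).toList = ['\n'] from rfl]
    have hfun : (String.toList ∘ PySem.Str.rstrip) = (fun l : String => PySem.Chars.rstrip l.toList) := by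
      funext l
      simp [Function.comp, PySem.Str.toList_rstrip]
    have hmaps2 : List.map String.toList
        (List.map PySem.Str.rstrip
          ((lines.drop (lines.takeWhile pvBlank).length).take
            ((lines.length - (lines.reverse.takeWhile pvBlank).length) - (lines.takeWhile pvBlank).length)))
        = (((lines.map (fun l => PySem.Chars.rstrip l.toList)).drop
              ((lines.map (fun l => PySem.Chars.rstrip l.toList)).takeWhile List.isEmpty).length).take
            ((lines.map (fun l => PySem.Chars.rstrip l.toList)).length
              - ((lines.map (fun l => PySem.Chars.rstrip l.toList)).reverse.takeWhile List.isEmpty).length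
              - ((lines.map (fun l => PySem.Chars.rstrip l.toList)).takeWhile List.isEmpty).length)) := by
      rw [List.map_map, hfun, List.map_take, List.map_drop, List.length_map, ← hA, ← hB]
    rw [hmaps2]
    congr 1
    exact (pv_core List.isEmpty (lines.map (fun l => PySem.Chars.rstrip l.toList))).symm

-- splitting "text" gives pieces without '\n', at the String level -----------

theorem pv_lines_clean (text : String) :
    ∀ l ∈ (PySem.Str.split? text "\n").getD [], '\n' ∉ l.toList := by
  intro l hl
  have hmap := PySem.Str.split?_map text "\n"
  have hsep : ("\n" : String).toList = ['\n'] := rfl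
  rw [hsep] at hmap
  rw [show PySem.Chars.split? text.toList ['\n']
      = some (PySem.Chars.splitOn text.toList ['\n']) from rfl] at hmap
  cases hsplit : PySem.Str.split? text "\n" with
  | none => rw [hsplit] at hmap; simp at hmap
  | some L =>
    rw [hsplit] at hmap
    simp only [Option.map_some, Option.some.injEq] at hmap
    rw [hsplit] at hl
    simp only [Option.getD_some] at hl
    have : l.toList ∈ PySem.Chars.splitOn text.toList ['\n'] := by
      rw [← hmap]
      exact List.mem_map_of_mem hl
    exact pv_splitOn_clean text.toList l.toList this

-- ===== VERDICT (by name: the statement is the Claim_ definition above) =====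
theorem strip_outer_only_py_spec : Claim_equal_strip_outer_only_py := by
  intro text _
  unfold Spec_strip_outer_only_py strip_outer_only_py strip_outer_only_py_alt
  by_cases h0 : text == ""
  · simp [h0]
  · simp only [h0]
    exact pv_main _ (pv_lines_clean text)
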